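-- pv_equiv track=rewrite | github.com/rangeetpan/decomposeDNNintoModules | Approach 6 (CM-RIE)/KMNIST/KMNIST-3/countE.py | computeEdge
-- ===== SOURCE A (Python) =====
-- def computeEdge(hidden):
--     inputE=784*49
--     hiddenE=0
--     for i in range(0,hidden-1):
--         hiddenE+=49*49
--     outputE=49*10
--     totalE=inputE+hiddenE+outputE
--     return totalE
-- ===== SOURCE B (Python) =====
-- def computeEdge(hidden):
--     return 784*49 + 49*49*max(0, hidden-1) + 49*10
-- ===== Notes on version B (the rewrite author's own statement) =====
-- stated objective: simpler
-- what changed: Replaced the accumulator loop over range(0, hidden-1) by the closed-form sum 784*49 + 49*49*max(0, hidden-1) + 49*10.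
import Mathlib
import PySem

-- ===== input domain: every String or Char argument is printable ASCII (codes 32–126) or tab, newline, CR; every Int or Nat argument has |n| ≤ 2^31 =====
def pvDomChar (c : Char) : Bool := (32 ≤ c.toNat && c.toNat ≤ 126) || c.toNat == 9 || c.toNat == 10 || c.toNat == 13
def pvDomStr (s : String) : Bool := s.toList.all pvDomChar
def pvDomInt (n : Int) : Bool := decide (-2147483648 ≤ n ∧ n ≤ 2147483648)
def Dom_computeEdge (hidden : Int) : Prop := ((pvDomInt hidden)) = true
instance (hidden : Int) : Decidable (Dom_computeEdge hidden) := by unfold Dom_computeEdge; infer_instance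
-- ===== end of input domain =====

-- B replaces A's per-iteration accumulator loop by a closed-form formula (objective: simpler).


-- ===== PORT A =====
def computeEdge (hidden : Int) : Int :=
  let inputE : Int := 784*49
  let hiddenE : Int := (PySem.List.pyRange 0 (hidden-1) 1).foldl (fun acc _ => acc + 49*49) 0
  let outputE : Int := 49*10
  let totalE := inputE + hiddenE + outputE
  totalE

-- ===== PORT B =====
def computeEdge_alt (hidden : Int) : Int :=
  784*49 + 49*49*(max 0 (hidden-1)) + 49*10

-- ===== PRECONDITION & SPEC =====
def Spec_computeEdge (hidden : Int) (out : Int) : Prop := out = computeEdge_alt hidden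
instance (hidden : Int) (out : Int) : Decidable (Spec_computeEdge hidden out) := by unfold Spec_computeEdge; infer_instance

-- ===== CLAIM (what is proved, stated in full; the proofs are below) =====
def Claim_equal_computeEdge : Prop := ∀ (hidden : Int), Dom_computeEdge hidden → Spec_computeEdge hidden (computeEdge hidden)

-- ===== LEMMAS AND PROOFS =====
theorem foldl_const_add (l : List Int) (init : Int) :
    l.foldl (fun acc _ => acc + 49*49) init = init + 49*49 * l.length := by
  induction l generalizing init with
  | nil => simp
  | cons x xs ih =>
    simp only [List.foldl_cons, List.length_cons, ih]
    push_cast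
    ring

-- ===== VERDICT (by name: the statement is the Claim_ definition above) =====
theorem computeEdge_spec : Claim_equal_computeEdge := by
  intro hidden _
  unfold Spec_computeEdge computeEdge computeEdge_alt
  simp only [foldl_const_add, PySem.List.length_pyRange_one]
  have : ((hidden - 1).toNat : Int) = max 0 (hidden - 1) := by omega
  omega
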